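-- pv_equiv track=rewrite | github.com/JR-One-Yard/Census | analysis/sydney_ai_advisory_target_suburbs.py | identify_region
-- ===== SOURCE A (Python) =====
-- def identify_region(suburb_name):
--     """Identify Sydney region based on suburb name patterns"""
--     suburb_lower = suburb_name.lower()
--
--     # Northern suburbs
--     if any(x in suburb_lower for x in ['mosman', 'cremorne', 'neutral bay', 'kirribilli', 'milsons point',
--                                          'lavender bay', 'mcmahons point', 'waverton', 'north sydney',
--                                          'crows nest', 'st leonards', 'greenwich', 'hunters hill', 'longueville',
--                                          'northbridge', 'castle cove', 'middle cove', 'castlecrag', 'willoughby']):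
--         return 'Lower North Shore'
--
--     if any(x in suburb_lower for x in ['chatswood', 'roseville', 'lindfield', 'killara', 'gordon', 'pymble',
--                                          'turramurra', 'st ives', 'wahroonga', 'hornsby']):
--         return 'Upper North Shore'
--
--     # Eastern suburbs
--     if any(x in suburb_lower for x in ['bondi', 'bronte', 'coogee', 'clovelly', 'randwick', 'dover heights',
--                                          'vaucluse', 'watsons bay', 'rose bay', 'double bay', 'bellevue hill',
--                                          'woollahra', 'paddington', 'edgecliff', 'queens park']):
--         return 'Eastern Suburbs'
--
--     # Northern Beaches
--     if any(x in suburb_lower for x in ['manly', 'seaforth', 'balgowlah', 'monavale', 'curl curl', 'freshwater',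
--                                          'dee why', 'collaroy', 'narrabeen', 'mona vale', 'newport', 'avalon',
--                                          'palm beach']):
--         return 'Northern Beaches'
--
--     # Inner West
--     if any(x in suburb_lower for x in ['balmain', 'rozelle', 'leichhardt', 'annandale', 'glebe', 'newtown',
--                                          'erskineville', 'alexandria', 'waterloo', 'redfern', 'surry hills',
--                                          'darlinghurst', 'potts point', 'elizabeth bay']):
--         return 'Inner City/Inner West'
--
--     # Hills District
--     if any(x in suburb_lower for x in ['castle hill', 'baulkham hills', 'kellyville', 'rouse hill', 'bella vista',
--                                          'cherrybrook', 'west pennant hills']):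
--         return 'Hills District'
--
--     # Sutherland Shire
--     if any(x in suburb_lower for x in ['sutherland', 'cronulla', 'caringbah', 'miranda', 'gymea', 'jannali']):
--         return 'Sutherland Shire'
--
--     # Canterbury-Bankstown / Inner West
--     if any(x in suburb_lower for x in ['strathfield', 'burwood', 'concord', 'five dock', 'drummoyne', 'gladesville']):
--         return 'Inner West'
--
--     # Western Sydney
--     if any(x in suburb_lower for x in ['parramatta', 'epping', 'carlingford', 'ryde', 'eastwood', 'west ryde']):
--         return 'Parramatta/Ryde'
--
--     return 'Other Sydney'
-- ===== SOURCE B (Python) =====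
-- # Region names indexed by priority group (0 = highest priority).
-- _REGIONS = ['Lower North Shore', 'Upper North Shore', 'Eastern Suburbs',
--             'Northern Beaches', 'Inner City/Inner West', 'Hills District',
--             'Sutherland Shire', 'Inner West', 'Parramatta/Ryde']
--
-- # (pattern, priority-group index) for every pattern of the classifier.
-- _TABLE = [
--     ('mosman', 0), ('cremorne', 0), ('neutral bay', 0), ('kirribilli', 0),
--     ('milsons point', 0), ('lavender bay', 0), ('mcmahons point', 0),
--     ('waverton', 0), ('north sydney', 0), ('crows nest', 0), ('st leonards', 0),
--     ('greenwich', 0), ('hunters hill', 0), ('longueville', 0),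
--     ('northbridge', 0), ('castle cove', 0), ('middle cove', 0),
--     ('castlecrag', 0), ('willoughby', 0),
--     ('chatswood', 1), ('roseville', 1), ('lindfield', 1), ('killara', 1),
--     ('gordon', 1), ('pymble', 1), ('turramurra', 1), ('st ives', 1),
--     ('wahroonga', 1), ('hornsby', 1),
--     ('bondi', 2), ('bronte', 2), ('coogee', 2), ('clovelly', 2),
--     ('randwick', 2), ('dover heights', 2), ('vaucluse', 2), ('watsons bay', 2),
--     ('rose bay', 2), ('double bay', 2), ('bellevue hill', 2), ('woollahra', 2),
--     ('paddington', 2), ('edgecliff', 2), ('queens park', 2),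
--     ('manly', 3), ('seaforth', 3), ('balgowlah', 3), ('monavale', 3),
--     ('curl curl', 3), ('freshwater', 3), ('dee why', 3), ('collaroy', 3),
--     ('narrabeen', 3), ('mona vale', 3), ('newport', 3), ('avalon', 3),
--     ('palm beach', 3),
--     ('balmain', 4), ('rozelle', 4), ('leichhardt', 4), ('annandale', 4),
--     ('glebe', 4), ('newtown', 4), ('erskineville', 4), ('alexandria', 4),
--     ('waterloo', 4), ('redfern', 4), ('surry hills', 4), ('darlinghurst', 4),
--     ('potts point', 4), ('elizabeth bay', 4),
--     ('castle hill', 5), ('baulkham hills', 5), ('kellyville', 5),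
--     ('rouse hill', 5), ('bella vista', 5), ('cherrybrook', 5),
--     ('west pennant hills', 5),
--     ('sutherland', 6), ('cronulla', 6), ('caringbah', 6), ('miranda', 6),
--     ('gymea', 6), ('jannali', 6),
--     ('strathfield', 7), ('burwood', 7), ('concord', 7), ('five dock', 7),
--     ('drummoyne', 7), ('gladesville', 7),
--     ('parramatta', 8), ('epping', 8), ('carlingford', 8), ('ryde', 8),
--     ('eastwood', 8), ('west ryde', 8),
-- ]
--
--
-- def _hits(s):
--     """Priority groups of every pattern occurrence, found by sliding over
--     the text positions and anchoring each pattern with startswith."""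
--     return [grp for i in range(len(s) + 1)
--                 for pat, grp in _TABLE if s.startswith(pat, i)]
--
--
-- def identify_region(suburb_name):
--     """Identify Sydney region based on suburb name patterns"""
--     s = suburb_name.lower()
--     hits = _hits(s)
--     return _REGIONS[min(hits)] if hits else 'Other Sydney'
-- ===== Notes on version B (the rewrite author's own statement) =====
-- stated objective: alternative
-- what changed: Replaces the pattern-major ordered if-chain of any() substring tests with a text-major sweep: slide over every position of the lowered name, anchor each pattern there with an offset startswith, collect the priority group of every match, and return the region of the minimum group (no early return).
import Mathlib
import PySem

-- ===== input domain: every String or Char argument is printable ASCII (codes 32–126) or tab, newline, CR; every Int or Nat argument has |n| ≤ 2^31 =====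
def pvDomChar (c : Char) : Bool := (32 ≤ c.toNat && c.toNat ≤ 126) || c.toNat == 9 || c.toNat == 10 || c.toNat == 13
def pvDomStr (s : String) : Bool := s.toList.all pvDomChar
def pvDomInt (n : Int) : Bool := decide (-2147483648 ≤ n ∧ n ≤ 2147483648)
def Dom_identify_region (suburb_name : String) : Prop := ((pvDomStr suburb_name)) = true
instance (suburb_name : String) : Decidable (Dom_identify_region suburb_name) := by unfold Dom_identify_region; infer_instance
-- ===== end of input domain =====

-- B replaces A's ordered pattern-major if-chain (each branch an any() of 'pattern in name')
-- by a text-major sweep: it slides over every position of the lowered name, anchors every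
-- pattern there with startswith, collects the priority group of every match, and returns
-- the region of the MINIMUM group (objective: alternative; same behaviour).

-- ===== PORT A =====
def identify_region (suburb_name : String) : String :=
  let suburb_lower := PySem.Str.lower suburb_name
  if (["mosman", "cremorne", "neutral bay", "kirribilli", "milsons point",
       "lavender bay", "mcmahons point", "waverton", "north sydney",
       "crows nest", "st leonards", "greenwich", "hunters hill", "longueville",
       "northbridge", "castle cove", "middle cove", "castlecrag", "willoughby"] : List String).any
      (fun x => PySem.Str.isIn x suburb_lower) then "Lower North Shore"
  else if (["chatswood", "roseville", "lindfield", "killara", "gordon", "pymble",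
       "turramurra", "st ives", "wahroonga", "hornsby"] : List String).any
      (fun x => PySem.Str.isIn x suburb_lower) then "Upper North Shore"
  else if (["bondi", "bronte", "coogee", "clovelly", "randwick", "dover heights",
       "vaucluse", "watsons bay", "rose bay", "double bay", "bellevue hill",
       "woollahra", "paddington", "edgecliff", "queens park"] : List String).any
      (fun x => PySem.Str.isIn x suburb_lower) then "Eastern Suburbs"
  else if (["manly", "seaforth", "balgowlah", "monavale", "curl curl", "freshwater",
       "dee why", "collaroy", "narrabeen", "mona vale", "newport", "avalon",
       "palm beach"] : List String).any
      (fun x => PySem.Str.isIn x suburb_lower) then "Northern Beaches"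
  else if (["balmain", "rozelle", "leichhardt", "annandale", "glebe", "newtown",
       "erskineville", "alexandria", "waterloo", "redfern", "surry hills",
       "darlinghurst", "potts point", "elizabeth bay"] : List String).any
      (fun x => PySem.Str.isIn x suburb_lower) then "Inner City/Inner West"
  else if (["castle hill", "baulkham hills", "kellyville", "rouse hill", "bella vista",
       "cherrybrook", "west pennant hills"] : List String).any
      (fun x => PySem.Str.isIn x suburb_lower) then "Hills District"
  else if (["sutherland", "cronulla", "caringbah", "miranda", "gymea", "jannali"] : List String).any
      (fun x => PySem.Str.isIn x suburb_lower) then "Sutherland Shire"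
  else if (["strathfield", "burwood", "concord", "five dock", "drummoyne", "gladesville"] : List String).any
      (fun x => PySem.Str.isIn x suburb_lower) then "Inner West"
  else if (["parramatta", "epping", "carlingford", "ryde", "eastwood", "west ryde"] : List String).any
      (fun x => PySem.Str.isIn x suburb_lower) then "Parramatta/Ryde"
  else "Other Sydney"

-- ===== PORT B =====
-- _REGIONS of Source B
def bRegions : List String :=
  ["Lower North Shore", "Upper North Shore", "Eastern Suburbs",
   "Northern Beaches", "Inner City/Inner West", "Hills District",
   "Sutherland Shire", "Inner West", "Parramatta/Ryde"]

-- _TABLE of Source B: (pattern, priority-group index)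
def bTable : List (String × Nat) :=
  [("mosman", 0), ("cremorne", 0), ("neutral bay", 0), ("kirribilli", 0),
   ("milsons point", 0), ("lavender bay", 0), ("mcmahons point", 0),
   ("waverton", 0), ("north sydney", 0), ("crows nest", 0), ("st leonards", 0),
   ("greenwich", 0), ("hunters hill", 0), ("longueville", 0),
   ("northbridge", 0), ("castle cove", 0), ("middle cove", 0),
   ("castlecrag", 0), ("willoughby", 0),
   ("chatswood", 1), ("roseville", 1), ("lindfield", 1), ("killara", 1),
   ("gordon", 1), ("pymble", 1), ("turramurra", 1), ("st ives", 1),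
   ("wahroonga", 1), ("hornsby", 1),
   ("bondi", 2), ("bronte", 2), ("coogee", 2), ("clovelly", 2),
   ("randwick", 2), ("dover heights", 2), ("vaucluse", 2), ("watsons bay", 2),
   ("rose bay", 2), ("double bay", 2), ("bellevue hill", 2), ("woollahra", 2),
   ("paddington", 2), ("edgecliff", 2), ("queens park", 2),
   ("manly", 3), ("seaforth", 3), ("balgowlah", 3), ("monavale", 3),
   ("curl curl", 3), ("freshwater", 3), ("dee why", 3), ("collaroy", 3),
   ("narrabeen", 3), ("mona vale", 3), ("newport", 3), ("avalon", 3),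
   ("palm beach", 3),
   ("balmain", 4), ("rozelle", 4), ("leichhardt", 4), ("annandale", 4),
   ("glebe", 4), ("newtown", 4), ("erskineville", 4), ("alexandria", 4),
   ("waterloo", 4), ("redfern", 4), ("surry hills", 4), ("darlinghurst", 4),
   ("potts point", 4), ("elizabeth bay", 4),
   ("castle hill", 5), ("baulkham hills", 5), ("kellyville", 5),
   ("rouse hill", 5), ("bella vista", 5), ("cherrybrook", 5),
   ("west pennant hills", 5),
   ("sutherland", 6), ("cronulla", 6), ("caringbah", 6), ("miranda", 6),
   ("gymea", 6), ("jannali", 6),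
   ("strathfield", 7), ("burwood", 7), ("concord", 7), ("five dock", 7),
   ("drummoyne", 7), ("gladesville", 7),
   ("parramatta", 8), ("epping", 8), ("carlingford", 8), ("ryde", 8),
   ("eastwood", 8), ("west ryde", 8)]

-- _hits(s) of Source B: the comprehension '[grp for i in range(len(s)+1) for pat, grp in _TABLE
-- if s.startswith(pat, i)]', ported as a flatMap over the range with filter+map inside;
-- Python's s.startswith(pat, i) is ported as startswith(s[i:], pat), exact for 0 <= i
def bHits (s : String) : List Nat :=
  (PySem.List.pyRange 0 (PySem.Str.len s + 1)).flatMap (fun i =>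
    (bTable.filter (fun pg =>
        PySem.Str.startswith (PySem.Str.slice s (some i) none) pg.1)).map (fun pg => pg.2))

def identify_region_alt (suburb_name : String) : String :=
  let s := PySem.Str.lower suburb_name
  -- '_REGIONS[min(hits)] if hits else ...': min(hits) is always < 9 = len(_REGIONS)
  -- (every group index in _TABLE is < 9), so getD is exact for Python's _REGIONS[...]
  match PySem.List.min? (bHits s) (fun x => x) with
  | some m => bRegions.getD m "Other Sydney"
  | none => "Other Sydney"

-- ===== PRECONDITION & SPEC =====
def Spec_identify_region (suburb_name : String) (out : String) : Prop := out = identify_region_alt suburb_name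
instance (suburb_name : String) (out : String) : Decidable (Spec_identify_region suburb_name out) := by unfold Spec_identify_region; infer_instance

-- ===== CLAIM (what is proved, stated in full; the proofs are below) =====
def Claim_equal_identify_region : Prop := ∀ (suburb_name : String), Dom_identify_region suburb_name → Spec_identify_region suburb_name (identify_region suburb_name)

-- ===== LEMMAS AND PROOFS =====

-- the pattern list of each priority group (group order = A's branch order)
def groupPats : Nat → List String
  | 0 => ["mosman", "cremorne", "neutral bay", "kirribilli", "milsons point",
          "lavender bay", "mcmahons point", "waverton", "north sydney",
          "crows nest", "st leonards", "greenwich", "hunters hill", "longueville",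
          "northbridge", "castle cove", "middle cove", "castlecrag", "willoughby"]
  | 1 => ["chatswood", "roseville", "lindfield", "killara", "gordon", "pymble",
          "turramurra", "st ives", "wahroonga", "hornsby"]
  | 2 => ["bondi", "bronte", "coogee", "clovelly", "randwick", "dover heights",
          "vaucluse", "watsons bay", "rose bay", "double bay", "bellevue hill",
          "woollahra", "paddington", "edgecliff", "queens park"]
  | 3 => ["manly", "seaforth", "balgowlah", "monavale", "curl curl", "freshwater",
          "dee why", "collaroy", "narrabeen", "mona vale", "newport", "avalon",
          "palm beach"]
  | 4 => ["balmain", "rozelle", "leichhardt", "annandale", "glebe", "newtown",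
          "erskineville", "alexandria", "waterloo", "redfern", "surry hills",
          "darlinghurst", "potts point", "elizabeth bay"]
  | 5 => ["castle hill", "baulkham hills", "kellyville", "rouse hill", "bella vista",
          "cherrybrook", "west pennant hills"]
  | 6 => ["sutherland", "cronulla", "caringbah", "miranda", "gymea", "jannali"]
  | 7 => ["strathfield", "burwood", "concord", "five dock", "drummoyne", "gladesville"]
  | 8 => ["parramatta", "epping", "carlingford", "ryde", "eastwood", "west ryde"]
  | _ => []

theorem table_eq : bTable = (List.range 9).flatMap (fun g => (groupPats g).map (fun p => (p, g))) := by
  rfl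

-- a pattern occurs somewhere in s  ↔  it is anchored by startswith at some scanned position
theorem occurs_iff (pat s : String) :
    (∃ i, i ∈ PySem.List.pyRange 0 (PySem.Str.len s + 1) ∧
       PySem.Str.startswith (PySem.Str.slice s (some i) none) pat = true) ↔
    PySem.Str.isIn pat s = true := by
  rw [PySem.Str.isIn_eq, ← PySem.Chars.exists_prefix_drop_iff_isIn]
  have hlen : PySem.Str.len s = (s.toList.length : Int) := by
    simp [PySem.Str.len_eq]
  constructor
  · rintro ⟨i, hi, hsw⟩
    rw [PySem.List.mem_pyRange_one] at hi
    rw [PySem.Str.startswith_eq, PySem.Chars.startswith_iff, PySem.Str.toList_slice,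
        PySem.Chars.slice_eq_listSlice, PySem.List.slice_from _ hi.1] at hsw
    exact ⟨i.toNat, hsw⟩
  · rintro ⟨j, hj⟩
    refine ⟨((min j s.toList.length : Nat) : Int), ?_, ?_⟩
    · rw [PySem.List.mem_pyRange_one, hlen]
      constructor
      · positivity
      · have : min j s.toList.length ≤ s.toList.length := min_le_right _ _
        omega
    · rw [PySem.Str.startswith_eq, PySem.Chars.startswith_iff, PySem.Str.toList_slice,
        PySem.Chars.slice_eq_listSlice, PySem.List.slice_from _ (by positivity)]
      rw [Int.toNat_natCast]
      rcases le_total j s.toList.length with h | h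
      · rw [min_eq_left h]; exact hj
      · have h1 : s.toList.drop j = [] := List.drop_eq_nil_of_le h
        have h2 : s.toList.drop s.toList.length = [] := List.drop_eq_nil_of_le le_rfl
        rw [min_eq_right h, h2]
        rw [h1] at hj
        exact hj

theorem mem_bHits (s : String) (g : Nat) :
    g ∈ bHits s ↔ ∃ pg ∈ bTable, pg.2 = g ∧ PySem.Str.isIn pg.1 s = true := by
  unfold bHits
  simp only [List.mem_flatMap, List.mem_map, List.mem_filter]
  constructor
  · rintro ⟨i, hi, pg, ⟨hmem, hsw⟩, hg⟩
    exact ⟨pg, hmem, hg, (occurs_iff pg.1 s).1 ⟨i, hi, hsw⟩⟩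
  · rintro ⟨pg, hmem, hg, hin⟩
    obtain ⟨i, hi, hsw⟩ := (occurs_iff pg.1 s).2 hin
    exact ⟨i, hi, pg, ⟨hmem, hsw⟩, hg⟩

theorem mem_bHits' (s : String) (g : Nat) :
    g ∈ bHits s ↔ g < 9 ∧ (groupPats g).any (fun x => PySem.Str.isIn x s) = true := by
  rw [mem_bHits, table_eq]
  constructor
  · rintro ⟨pg, hmem, hg, hin⟩
    simp only [List.mem_flatMap, List.mem_range, List.mem_map] at hmem
    obtain ⟨g', hg9, p, hp, rfl⟩ := hmem
    cases hg
    exact ⟨hg9, List.any_eq_true.2 ⟨p, hp, hin⟩⟩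
  · rintro ⟨hg9, hany⟩
    obtain ⟨p, hp, hin⟩ := List.any_eq_true.1 hany
    refine ⟨(p, g), ?_, rfl, hin⟩
    simp only [List.mem_flatMap, List.mem_range, List.mem_map]
    exact ⟨g, hg9, p, hp, rfl⟩

-- if group g matches and no earlier group does, B returns group g's region
theorem pick (L : String) (g : Nat) (hg9 : g < 9)
    (hg : (groupPats g).any (fun x => PySem.Str.isIn x L) = true)
    (hlt : ∀ j, j < g → (groupPats j).any (fun x => PySem.Str.isIn x L) = false) :
    (match PySem.List.min? (bHits L) (fun x => x) with
     | some m => bRegions.getD m "Other Sydney"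
     | none => "Other Sydney") = bRegions.getD g "Other Sydney" := by
  have hmem : g ∈ bHits L := (mem_bHits' L g).2 ⟨hg9, hg⟩
  cases hmin : PySem.List.min? (bHits L) (fun x => x) with
  | none =>
    rw [PySem.List.min?_eq_none_iff] at hmin
    rw [hmin] at hmem
    exact absurd hmem (List.not_mem_nil)
  | some m =>
    have hm := PySem.List.min?_mem hmin
    have hle : m ≤ g := PySem.List.min?_isMin hmin g hmem
    have hnlt : ¬ m < g := by
      intro hlt'
      have h2 := ((mem_bHits' L m).1 hm).2
      rw [hlt m hlt'] at h2
      exact Bool.false_ne_true h2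
    have : m = g := by omega
    rw [this]

-- if no group matches, B returns 'Other Sydney'
theorem pick_none (L : String)
    (hall : ∀ j, j < 9 → (groupPats j).any (fun x => PySem.Str.isIn x L) = false) :
    (match PySem.List.min? (bHits L) (fun x => x) with
     | some m => bRegions.getD m "Other Sydney"
     | none => "Other Sydney") = "Other Sydney" := by
  cases hmin : PySem.List.min? (bHits L) (fun x => x) with
  | none => rfl
  | some m =>
    have hm := (mem_bHits' L m).1 (PySem.List.min?_mem hmin)
    rw [hall m hm.1] at hm
    exact absurd hm.2 Bool.false_ne_true

-- ===== VERDICT (by name: the statement is the Claim_ definition above) =====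
set_option maxHeartbeats 2000000 in
theorem identify_region_spec : Claim_equal_identify_region := by
  intro s _
  show identify_region s = identify_region_alt s
  have hA : identify_region s =
      (if (groupPats 0).any (fun x => PySem.Str.isIn x (PySem.Str.lower s)) then bRegions.getD 0 "Other Sydney"
       else if (groupPats 1).any (fun x => PySem.Str.isIn x (PySem.Str.lower s)) then bRegions.getD 1 "Other Sydney"
       else if (groupPats 2).any (fun x => PySem.Str.isIn x (PySem.Str.lower s)) then bRegions.getD 2 "Other Sydney"
       else if (groupPats 3).any (fun x => PySem.Str.isIn x (PySem.Str.lower s)) then bRegions.getD 3 "Other Sydney"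
       else if (groupPats 4).any (fun x => PySem.Str.isIn x (PySem.Str.lower s)) then bRegions.getD 4 "Other Sydney"
       else if (groupPats 5).any (fun x => PySem.Str.isIn x (PySem.Str.lower s)) then bRegions.getD 5 "Other Sydney"
       else if (groupPats 6).any (fun x => PySem.Str.isIn x (PySem.Str.lower s)) then bRegions.getD 6 "Other Sydney"
       else if (groupPats 7).any (fun x => PySem.Str.isIn x (PySem.Str.lower s)) then bRegions.getD 7 "Other Sydney"
       else if (groupPats 8).any (fun x => PySem.Str.isIn x (PySem.Str.lower s)) then bRegions.getD 8 "Other Sydney"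
       else "Other Sydney") := rfl
  have hB : identify_region_alt s =
      (match PySem.List.min? (bHits (PySem.Str.lower s)) (fun x => x) with
       | some m => bRegions.getD m "Other Sydney"
       | none => "Other Sydney") := rfl
  rw [hA, hB]
  set L := PySem.Str.lower s with hL
  by_cases h0 : (groupPats 0).any (fun x => PySem.Str.isIn x L) = true
  · rw [if_pos h0]; exact (pick L 0 (by omega) h0 (fun j hj => absurd hj (Nat.not_lt_zero j))).symm
  rw [if_neg h0]
  by_cases h1 : (groupPats 1).any (fun x => PySem.Str.isIn x L) = true
  · rw [if_pos h1]
    refine (pick L 1 (by omega) h1 ?_).symm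
    intro j hj; interval_cases j; exact eq_false_of_ne_true h0
  rw [if_neg h1]
  by_cases h2 : (groupPats 2).any (fun x => PySem.Str.isIn x L) = true
  · rw [if_pos h2]
    refine (pick L 2 (by omega) h2 ?_).symm
    intro j hj; interval_cases j
    exacts [eq_false_of_ne_true h0, eq_false_of_ne_true h1]
  rw [if_neg h2]
  by_cases h3 : (groupPats 3).any (fun x => PySem.Str.isIn x L) = true
  · rw [if_pos h3]
    refine (pick L 3 (by omega) h3 ?_).symm
    intro j hj; interval_cases j
    exacts [eq_false_of_ne_true h0, eq_false_of_ne_true h1, eq_false_of_ne_true h2]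
  rw [if_neg h3]
  by_cases h4 : (groupPats 4).any (fun x => PySem.Str.isIn x L) = true
  · rw [if_pos h4]
    refine (pick L 4 (by omega) h4 ?_).symm
    intro j hj; interval_cases j
    exacts [eq_false_of_ne_true h0, eq_false_of_ne_true h1, eq_false_of_ne_true h2,
            eq_false_of_ne_true h3]
  rw [if_neg h4]
  by_cases h5 : (groupPats 5).any (fun x => PySem.Str.isIn x L) = true
  · rw [if_pos h5]
    refine (pick L 5 (by omega) h5 ?_).symm
    intro j hj; interval_cases j
    exacts [eq_false_of_ne_true h0, eq_false_of_ne_true h1, eq_false_of_ne_true h2,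
            eq_false_of_ne_true h3, eq_false_of_ne_true h4]
  rw [if_neg h5]
  by_cases h6 : (groupPats 6).any (fun x => PySem.Str.isIn x L) = true
  · rw [if_pos h6]
    refine (pick L 6 (by omega) h6 ?_).symm
    intro j hj; interval_cases j
    exacts [eq_false_of_ne_true h0, eq_false_of_ne_true h1, eq_false_of_ne_true h2,
            eq_false_of_ne_true h3, eq_false_of_ne_true h4, eq_false_of_ne_true h5]
  rw [if_neg h6]
  by_cases h7 : (groupPats 7).any (fun x => PySem.Str.isIn x L) = true
  · rw [if_pos h7]
    refine (pick L 7 (by omega) h7 ?_).symm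
    intro j hj; interval_cases j
    exacts [eq_false_of_ne_true h0, eq_false_of_ne_true h1, eq_false_of_ne_true h2,
            eq_false_of_ne_true h3, eq_false_of_ne_true h4, eq_false_of_ne_true h5,
            eq_false_of_ne_true h6]
  rw [if_neg h7]
  by_cases h8 : (groupPats 8).any (fun x => PySem.Str.isIn x L) = true
  · rw [if_pos h8]
    refine (pick L 8 (by omega) h8 ?_).symm
    intro j hj; interval_cases j
    exacts [eq_false_of_ne_true h0, eq_false_of_ne_true h1, eq_false_of_ne_true h2,
            eq_false_of_ne_true h3, eq_false_of_ne_true h4, eq_false_of_ne_true h5,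
            eq_false_of_ne_true h6, eq_false_of_ne_true h7]
  rw [if_neg h8]
  refine (pick_none L ?_).symm
  intro j hj; interval_cases j
  exacts [eq_false_of_ne_true h0, eq_false_of_ne_true h1, eq_false_of_ne_true h2,
          eq_false_of_ne_true h3, eq_false_of_ne_true h4, eq_false_of_ne_true h5,
          eq_false_of_ne_true h6, eq_false_of_ne_true h7, eq_false_of_ne_true h8]
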